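-- pv_equiv track=rewrite | github.com/rohan-agarwal/VRP-Heuristics | functions.py | dtof
-- ===== SOURCE A (Python) =====
-- def dtof(d):
--     f = [2] * len(d)
--     for i in range(len(d)):
--         if d[i] >= 75:
--             f[i] = 3
--         if d[i] >= 150:
--             f[i] = 5
--     return f
-- ===== SOURCE B (Python) =====
-- def dtof(d):
--     bounds = [75, 150]
--     vals = [2, 3, 5]
--
--     def bisect_right(a, x):
--         lo, hi = 0, len(a)
--         while lo < hi:
--             mid = (lo + hi) // 2
--             if x < a[mid]:
--                 hi = mid
--             else:
--                 lo = mid + 1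
--         return lo
--
--     return [vals[bisect_right(bounds, x)] for x in d]
-- ===== Notes on version B (the rewrite author's own statement) =====
-- stated objective: idiomatic
-- what changed: Replaces the index loop with sequential overwriting if-tests by a table-driven classification: each element's category is found by binary search (bisect_right) in a threshold table and looked up in a value table, in a single comprehension.
import Mathlib
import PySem

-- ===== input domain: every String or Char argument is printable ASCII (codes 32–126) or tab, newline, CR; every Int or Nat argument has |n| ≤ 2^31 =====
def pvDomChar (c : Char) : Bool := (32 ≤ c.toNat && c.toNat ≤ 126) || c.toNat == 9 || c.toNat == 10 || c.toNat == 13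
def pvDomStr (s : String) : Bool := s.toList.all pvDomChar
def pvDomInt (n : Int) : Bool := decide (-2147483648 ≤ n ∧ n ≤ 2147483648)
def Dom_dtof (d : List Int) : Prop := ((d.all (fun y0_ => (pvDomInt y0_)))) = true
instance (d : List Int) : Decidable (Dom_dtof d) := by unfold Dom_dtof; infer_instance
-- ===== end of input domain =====

-- B replaces A's loop of sequential overwriting if-tests by a table-driven
-- classification (binary search in a threshold table); objective: idiomatic.

-- ===== PORT A =====
def dtof (d : List Int) : List Int :=
  let f := List.replicate d.length (2 : Int)
  (PySem.List.pyRange 0 (d.length : Int) 1).foldl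
    (fun f i =>
      let f := if PySem.List.pyGetD d i 0 ≥ 75 then PySem.List.pySetD f i 3 else f
      if PySem.List.pyGetD d i 0 ≥ 150 then PySem.List.pySetD f i 5 else f)
    f

-- ===== PORT B =====
-- hand-written bisect_right of Source B (while-loop as recursion on hi - lo)
def bisectRight (a : List Int) (x : Int) (lo hi : Nat) : Nat :=
  if lo < hi then
    let mid := (lo + hi) / 2  -- Nat division: exact for Python's // here (lo, hi ≥ 0)
    if x < PySem.List.pyGetD a (mid : Int) 0 then bisectRight a x lo mid
    else bisectRight a x (mid + 1) hi
  else lo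
termination_by hi - lo
decreasing_by all_goals omega

def dtof_alt (d : List Int) : List Int :=
  let bounds : List Int := [75, 150]
  let vals : List Int := [2, 3, 5]
  d.map (fun x => PySem.List.pyGetD vals (bisectRight bounds x 0 bounds.length : Int) 0)

-- ===== PRECONDITION & SPEC =====
def Spec_dtof (d : List Int) (out : List Int) : Prop := out = dtof_alt d
instance (d : List Int) (out : List Int) : Decidable (Spec_dtof d out) := by unfold Spec_dtof; infer_instance

-- ===== CLAIM (what is proved, stated in full; the proofs are below) =====
def Claim_equal_dtof : Prop := ∀ (d : List Int), Dom_dtof d → Spec_dtof d (dtof d)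

-- ===== LEMMAS AND PROOFS =====

-- per-element value of A's loop body
def aval (x : Int) : Int := if x ≥ 150 then 5 else if x ≥ 75 then 3 else 2

theorem bisect_eval (x : Int) :
    bisectRight [75, 150] x 0 2 = if x < 150 then (if x < 75 then 0 else 1) else 2 := by
  by_cases h2 : x < 150 <;> by_cases h1 : x < 75 <;>
    simp [bisectRight, PySem.List.pyGetD, h1, h2]

theorem bval_eq_aval (x : Int) :
    PySem.List.pyGetD [2, 3, 5] (bisectRight [75, 150] x 0 2 : Int) 0 = aval x := by
  rw [bisect_eval]
  unfold aval
  split_ifs <;> first | rfl | omega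

theorem getD_mid (g : List Int) (x : Int) (rest : List Int) :
    (g ++ x :: rest).getD g.length 0 = x := by
  simp [List.getD]

theorem loop_gen (suf : List Int) : ∀ (pre g : List Int), g.length = pre.length →
    (PySem.List.pyRange (pre.length : Int) ((pre.length : Int) + suf.length) 1).foldl
      (fun f i =>
        let f := if PySem.List.pyGetD (pre ++ suf) i 0 ≥ 75 then PySem.List.pySetD f i 3 else f
        if PySem.List.pyGetD (pre ++ suf) i 0 ≥ 150 then PySem.List.pySetD f i 5 else f)
      (g ++ List.replicate suf.length 2) = g ++ suf.map aval := by
  induction suf with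
  | nil =>
      intro pre g hg
      simp [PySem.List.pyRange_one_eq_nil]
  | cons x rest ih =>
      intro pre g hg
      rw [PySem.List.pyRange_one_cons (by simp only [List.length_cons]; push_cast; omega)]
      simp only [List.foldl_cons]
      have hget : PySem.List.pyGetD (pre ++ x :: rest) (pre.length : Int) 0 = x := by
        rw [PySem.List.pyGetD_natCast]; exact getD_mid pre x rest
      have hstep :
          (let f := if PySem.List.pyGetD (pre ++ x :: rest) (pre.length : Int) 0 ≥ 75 then
                      PySem.List.pySetD (g ++ List.replicate (x :: rest).length 2) (pre.length : Int) 3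
                    else g ++ List.replicate (x :: rest).length 2
           if PySem.List.pyGetD (pre ++ x :: rest) (pre.length : Int) 0 ≥ 150 then
             PySem.List.pySetD f (pre.length : Int) 5
           else f) = (g ++ [aval x]) ++ List.replicate rest.length 2 := by
        rw [hget]
        simp only [List.length_cons, List.replicate_succ, PySem.List.pySetD_natCast, ← hg]
        unfold aval
        split_ifs with h1 h2 <;>
          simp_all
      rw [hstep]
      have hrw : PySem.List.pyRange ((pre.length : Int) + 1) ((pre.length : Int) + (x :: rest).length) 1
          = PySem.List.pyRange ((pre ++ [x]).length : Int) (((pre ++ [x]).length : Int) + rest.length) 1 := by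
        simp; ring_nf
      rw [hrw]
      have hd : pre ++ x :: rest = (pre ++ [x]) ++ rest := by simp
      rw [hd]
      rw [ih (pre ++ [x]) (g ++ [aval x]) (by simp [hg])]
      simp

theorem dtof_eq_map (d : List Int) : dtof d = d.map aval := by
  unfold dtof
  have := loop_gen d [] []
  simpa using this rfl

-- ===== VERDICT (by name: the statement is the Claim_ definition above) =====
theorem dtof_spec : Claim_equal_dtof := by
  intro d _
  unfold Spec_dtof dtof_alt
  rw [dtof_eq_map]
  simp only [List.map_inj_left]
  intro x _
  exact (bval_eq_aval x).symm
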